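-- pv_equiv track=rewrite | github.com/aniketp1304/chatbot-project | utils.py | chunk_lines_into_passages
-- ===== SOURCE A (Python) =====
-- def chunk_lines_into_passages(lines, chunk_lines=4):
--     """Group lines into passages, preserving Q/A blocks."""
--     passages = []
--     line_mapping = {}
--     buffer = []
--     for idx, line in enumerate(lines, 1):
--         if line.strip() == "":
--             if buffer:
--                 passages.append(" ".join(buffer))
--                 line_mapping[len(passages) - 1] = idx - len(buffer)
--                 buffer = []
--         else:
--             buffer.append(line.strip())
--     if buffer:
--         passages.append(" ".join(buffer))
--         line_mapping[len(passages) - 1] = len(lines) - len(buffer) + 1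
--     return passages, line_mapping
-- ===== SOURCE B (Python) =====
-- def chunk_lines_into_passages(lines, chunk_lines=4):
--     """Group lines into passages, preserving Q/A blocks."""
--     passages = []
--     line_mapping = {}
--     i = 0
--     n = len(lines)
--     while i < n:
--         if lines[i].strip() == "":
--             i += 1
--             continue
--         j = i
--         while j < n and lines[j].strip() != "":
--             j += 1
--         line_mapping[len(passages)] = i + 1
--         passages.append(" ".join(s.strip() for s in lines[i:j]))
--         i = j
--     return passages, line_mapping
-- ===== Notes on version B (the rewrite author's own statement) =====
-- stated objective: alternative
-- what changed: Replaces A's element-by-element fold with a blank-line-triggered buffer and end-of-loop flush by an index-based two-pointer scan: find each maximal non-blank run with an inner scan, emit its passage and 1-based start directly, with no buffer state and no final flush.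
import Mathlib
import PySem

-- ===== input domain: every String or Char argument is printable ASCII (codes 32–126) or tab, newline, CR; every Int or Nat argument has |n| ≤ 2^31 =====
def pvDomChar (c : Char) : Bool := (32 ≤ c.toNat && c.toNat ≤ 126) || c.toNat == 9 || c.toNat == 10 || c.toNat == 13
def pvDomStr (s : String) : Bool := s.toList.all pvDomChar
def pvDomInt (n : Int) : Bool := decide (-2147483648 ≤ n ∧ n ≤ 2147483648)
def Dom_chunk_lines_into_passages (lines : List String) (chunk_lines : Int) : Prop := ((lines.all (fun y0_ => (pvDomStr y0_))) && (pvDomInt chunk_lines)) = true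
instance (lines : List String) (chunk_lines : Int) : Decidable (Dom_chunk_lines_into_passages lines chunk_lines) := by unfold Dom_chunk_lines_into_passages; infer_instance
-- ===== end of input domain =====

-- B replaces A's buffer-and-flush fold by a two-pointer scan over maximal non-blank runs; same cost, no buffer state (objective: alternative).

-- ===== PORT A =====
-- one loop iteration of A: state = (passages, line_mapping, buffer), item = (idx, line)
def aStep (st : List String × PySem.Dict Int Int × List String) (p : Int × String) :
    List String × PySem.Dict Int Int × List String :=
  if PySem.Str.strip p.2 == "" then
    if st.2.2 ≠ [] then
      (st.1 ++ [PySem.Str.join " " st.2.2],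
       st.2.1.insert ((st.1.length : Int)) (p.1 - (st.2.2.length : Int)),
       ([] : List String))
    else st
  else (st.1, st.2.1, st.2.2 ++ [PySem.Str.strip p.2])

def chunk_lines_into_passages (lines : List String) (chunk_lines : Int) : List String × (List (Int × Int)) :=
  let st := (PySem.List.enumerate lines 1).foldl aStep ([], PySem.Dict.empty, [])
  if st.2.2 ≠ [] then
    (st.1 ++ [PySem.Str.join " " st.2.2],
     (st.2.1.insert ((st.1.length : Int)) ((lines.length : Int) - (st.2.2.length : Int) + 1)).items)
  else (st.1, st.2.1.items)

-- ===== PORT B =====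
def bBlank (s : String) : Bool := PySem.Str.strip s == ""

-- the outer while-loop of Source B: i is the 1-based index of the head line; each maximal
-- non-blank run (the inner `while j < n` scan = takeWhile/dropWhile) yields one (start, passage)
def bGroups (i : Int) : List String → List (Int × String)
  | [] => []
  | l :: rest =>
    if bBlank l then bGroups (i + 1) rest
    else
      (i, PySem.Str.join " " ((l :: rest.takeWhile (fun s => !(bBlank s))).map PySem.Str.strip)) ::
        bGroups (i + 1 + (rest.takeWhile (fun s => !(bBlank s))).length)
          (rest.dropWhile (fun s => !(bBlank s)))
  termination_by xs => xs.length
  decreasing_by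
    · simp
    · have := List.length_dropWhile_le (fun s => !(bBlank s)) rest
      simp; omega

def chunk_lines_into_passages_alt (lines : List String) (chunk_lines : Int) : List String × (List (Int × Int)) :=
  let gs := bGroups 1 lines
  (gs.map (·.2), gs.zipIdx.map (fun p => ((p.2 : Int), p.1.1)))

-- ===== PRECONDITION & SPEC =====
def Spec_chunk_lines_into_passages (lines : List String) (chunk_lines : Int) (out : List String × (List (Int × Int))) : Prop := out = chunk_lines_into_passages_alt lines chunk_lines
instance (lines : List String) (chunk_lines : Int) (out : List String × (List (Int × Int))) : Decidable (Spec_chunk_lines_into_passages lines chunk_lines out) := by unfold Spec_chunk_lines_into_passages; infer_instance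

-- ===== CLAIM (what is proved, stated in full; the proofs are below) =====
def Claim_equal_chunk_lines_into_passages : Prop := ∀ (lines : List String) (chunk_lines : Int), Dom_chunk_lines_into_passages lines chunk_lines → Spec_chunk_lines_into_passages lines chunk_lines (chunk_lines_into_passages lines chunk_lines)

-- ===== LEMMAS AND PROOFS =====

-- abstract description of A's remaining output when the loop still has `xs` to process,
-- current buffer B (of stripped lines), head index i: list of (start, passage)
def runA (i : Int) (B : List String) : List String → List (Int × String)
  | [] => if B ≠ [] then [(i - (B.length : Int), PySem.Str.join " " B)] else []
  | l :: rest =>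
    if bBlank l then
      (if B ≠ [] then [(i - (B.length : Int), PySem.Str.join " " B)] else []) ++ runA (i + 1) [] rest
    else runA (i + 1) (B ++ [PySem.Str.strip l]) rest

def addMap (b : Nat) : List (Int × String) → List (Int × Int)
  | [] => []
  | g :: gs => ((b : Int), g.1) :: addMap (b + 1) gs

def flushAt (e : Int) (st : List String × PySem.Dict Int Int × List String) :
    List String × (List (Int × Int)) :=
  if st.2.2 ≠ [] then
    (st.1 ++ [PySem.Str.join " " st.2.2],
     (st.2.1.insert ((st.1.length : Int)) (e - (st.2.2.length : Int))).items)
  else (st.1, st.2.1.items)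

lemma zipIdx_map_eq_addMap (gs : List (Int × String)) : ∀ n,
    (gs.zipIdx n).map (fun p => ((p.2 : Int), p.1.1)) = addMap n gs := by
  induction gs with
  | nil => intro n; simp [addMap]
  | cons g gs ih => intro n; simp [List.zipIdx, addMap, ih]

lemma fold_runA (xs : List String) : ∀ (i : Int) (P : List String) (M : PySem.Dict Int Int) (B : List String),
    (∀ k ∈ M.keys, k < (P.length : Int)) →
    flushAt (i + (xs.length : Int)) ((PySem.List.enumerate xs i).foldl aStep (P, M, B)) =
      (P ++ (runA i B xs).map (·.2), M.items ++ addMap P.length (runA i B xs)) := by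
  induction xs with
  | nil =>
    intro i P M B hM
    simp only [PySem.List.enumerate_nil, List.foldl_nil, runA, flushAt]
    by_cases hB : B = []
    · simp [hB, addMap]
    · have hfresh : M.contains ((P.length : Int)) = false := by
        rw [← Bool.not_eq_true, PySem.Dict.contains_iff_mem_keys]
        intro h; exact absurd (hM _ h) (by omega)
      simp [hB, addMap, PySem.Dict.items_insert_of_not_contains _ _ hfresh]
  | cons l rest ih =>
    intro i P M B hM
    rw [PySem.List.enumerate_cons, List.foldl_cons]
    by_cases hbl : bBlank l = true
    · have hstrip : (PySem.Str.strip l == "") = true := hbl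
      by_cases hB : B = []
      · have hstep : aStep (P, M, B) (i, l) = (P, M, B) := by
          simp [aStep, hstrip, hB]
        rw [hstep]
        have := ih (i + 1) P M ([] : List String) hM
        rw [hB]
        rw [show i + ((l :: rest).length : Int) = (i + 1) + (rest.length : Int) by push_cast [List.length_cons]; ring]
        rw [this]
        simp [runA, hbl]
      · have hstep : aStep (P, M, B) (i, l) =
            (P ++ [PySem.Str.join " " B],
             M.insert ((P.length : Int)) (i - (B.length : Int)), ([] : List String)) := by
          simp [aStep, hstrip, hB]
        rw [hstep]
        have hfresh : M.contains ((P.length : Int)) = false := by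
          rw [← Bool.not_eq_true, PySem.Dict.contains_iff_mem_keys]
          intro h; exact absurd (hM _ h) (by omega)
        have hM' : ∀ k ∈ (M.insert ((P.length : Int)) (i - (B.length : Int))).keys,
            k < ((P ++ [PySem.Str.join " " B]).length : Int) := by
          intro k hk
          rw [PySem.Dict.keys_insert_of_not_contains _ _ hfresh] at hk
          simp only [List.mem_append, List.mem_singleton] at hk
          rcases hk with hk | hk
          · have := hM _ hk; simp; omega
          · simp [hk]
        have := ih (i + 1) (P ++ [PySem.Str.join " " B])
          (M.insert ((P.length : Int)) (i - (B.length : Int))) ([] : List String) hM'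
        rw [show i + ((l :: rest).length : Int) = (i + 1) + (rest.length : Int) by push_cast [List.length_cons]; ring]
        rw [this]
        simp only [runA, hbl, if_pos, hB, ne_eq, not_false_iff,
          List.map_cons, List.singleton_append, Prod.mk.injEq]
        constructor
        · simp
        · rw [PySem.Dict.items_insert_of_not_contains _ _ hfresh]
          simp [addMap]
    · have hbl' : bBlank l = false := by revert hbl; cases h : bBlank l <;> simp
      have hstrip : (PySem.Str.strip l == "") = false := hbl'
      have hstep : aStep (P, M, B) (i, l) = (P, M, B ++ [PySem.Str.strip l]) := by
        simp [aStep, hstrip]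
      rw [hstep]
      have := ih (i + 1) P M (B ++ [PySem.Str.strip l]) hM
      rw [show i + ((l :: rest).length : Int) = (i + 1) + (rest.length : Int) by push_cast [List.length_cons]; ring]
      rw [this]
      simp [runA, hbl']

lemma runA_take : ∀ (ys : List String) (i : Int) (B : List String) (zs : List String),
    (∀ s ∈ ys, bBlank s = false) →
    runA i B (ys ++ zs) = runA (i + (ys.length : Int)) (B ++ ys.map PySem.Str.strip) zs := by
  intro ys
  induction ys with
  | nil => intro i B zs _; simp
  | cons y ys ih =>
    intro i B zs h
    have hy : bBlank y = false := h y (List.mem_cons_self ..)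
    simp only [List.cons_append, runA, hy, Bool.false_eq_true, if_false]
    rw [ih (i + 1) (B ++ [PySem.Str.strip y]) zs (fun s hs => h s (List.mem_cons_of_mem _ hs))]
    simp only [List.map_cons, List.append_assoc, List.singleton_append]
    congr 1
    push_cast [List.length_cons]; ring

lemma runA_eq_bGroups : ∀ (n : Nat) (xs : List String), xs.length ≤ n → ∀ i,
    runA i [] xs = bGroups i xs := by
  intro n
  induction n with
  | zero =>
    intro xs h i
    have : xs = [] := List.eq_nil_of_length_eq_zero (Nat.le_zero.mp h)
    subst this; simp [runA, bGroups]
  | succ n ih =>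
    intro xs h i
    match xs with
    | [] => simp [runA, bGroups]
    | l :: rest =>
      by_cases hbl : bBlank l = true
      · rw [bGroups, if_pos hbl]
        simp only [runA, hbl, if_pos, ne_eq, not_true_eq_false, ite_false]
        simp only [List.nil_append] at *
        exact (by simpa using ih rest (by simpa using Nat.lt_succ_iff.mp (by simpa using h)) (i + 1))
      · have hbl' : bBlank l = false := by revert hbl; cases hb : bBlank l <;> simp
        rw [bGroups, if_neg (by simp [hbl'])]
        set p : String → Bool := fun s => !(bBlank s) with hp
        have hsplit : rest = rest.takeWhile p ++ rest.dropWhile p :=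
          (List.takeWhile_append_dropWhile).symm
        have hrun : ∀ s ∈ l :: rest.takeWhile p, bBlank s = false := by
          intro s hs
          rcases List.mem_cons.mp hs with hs | hs
          · exact hs ▸ hbl'
          · have := List.mem_takeWhile_imp hs
            simpa [hp] using this
        have h1 : runA i [] (l :: rest) =
            runA (i + 1 + ((rest.takeWhile p).length : Int))
              (PySem.Str.strip l :: (rest.takeWhile p).map PySem.Str.strip) (rest.dropWhile p) := by
          rw [show (l :: rest) = (l :: rest.takeWhile p) ++ rest.dropWhile p from by
            rw [List.cons_append, ← hsplit]]
          rw [runA_take (l :: rest.takeWhile p) i [] (rest.dropWhile p) hrun]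
          simp only [List.map_cons, List.nil_append]
          congr 1
          push_cast [List.length_cons]; ring
        rw [h1]
        match hdw : rest.dropWhile p with
        | [] =>
          simp only [runA, bGroups, ne_eq, reduceCtorEq, not_false_iff, ite_true]
          congr 2
          push_cast [List.length_cons, List.length_map]; ring
        | m :: tail =>
          have hm : bBlank m = true := by
            have h0 : rest.dropWhile p ≠ [] := by rw [hdw]; simp
            have hnp := List.head_dropWhile_not p h0
            have hhead : (rest.dropWhile p).head h0 = m := by simp [hdw]
            rw [hhead] at hnp
            simpa [hp] using hnp
          have htail : tail.length ≤ n := by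
            have h2 : (rest.dropWhile p).length ≤ rest.length := List.length_dropWhile_le _ _
            rw [hdw] at h2
            simp only [List.length_cons] at h2 h
            omega
          simp only [runA, bGroups, hm, ite_true, ne_eq, reduceCtorEq, not_false_iff,
            List.singleton_append, List.map_cons]
          rw [ih tail htail]
          refine congrArg₂ List.cons (congrArg₂ Prod.mk ?_ rfl) rfl
          push_cast [List.length_cons, List.length_map]; ring

-- ===== VERDICT (by name: the statement is the Claim_ definition above) =====
theorem chunk_lines_into_passages_spec : Claim_equal_chunk_lines_into_passages := by
  intro lines chunk_lines _
  show chunk_lines_into_passages lines chunk_lines = chunk_lines_into_passages_alt lines chunk_lines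
  have key : ∀ st : List String × PySem.Dict Int Int × List String,
      (if st.2.2 ≠ [] then
        (st.1 ++ [PySem.Str.join " " st.2.2],
         (st.2.1.insert ((st.1.length : Int)) ((lines.length : Int) - (st.2.2.length : Int) + 1)).items)
      else (st.1, st.2.1.items)) = flushAt (1 + (lines.length : Int)) st := by
    intro st
    unfold flushAt
    split_ifs with h
    · have : (lines.length : Int) - (st.2.2.length : Int) + 1 =
          1 + (lines.length : Int) - (st.2.2.length : Int) := by omega
      rw [this]
    · rfl
  have hA : chunk_lines_into_passages lines chunk_lines =
      flushAt (1 + (lines.length : Int))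
        ((PySem.List.enumerate lines 1).foldl aStep ([], PySem.Dict.empty, [])) := by
    unfold chunk_lines_into_passages
    exact key _
  rw [hA]
  have hfold := fold_runA lines 1 [] PySem.Dict.empty []
    (by intro k hk; simp [PySem.Dict.keys, PySem.Dict.empty] at hk)
  rw [hfold]
  rw [runA_eq_bGroups lines.length lines (le_refl _) 1]
  unfold chunk_lines_into_passages_alt
  simp [zipIdx_map_eq_addMap, PySem.Dict.empty]
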